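-- pv_equiv track=rewrite | github.com/heineborell/grand_tours | src/data/segment_analyse.py | optimize_for_shortest_segments
-- ===== SOURCE A (Python) =====
-- def check_overlap(segment1: list[int], segment2: list[int]) -> bool:
--     """
--     Check if two segments overlap
--
--     Args:
--         segment1: First segment [start, end]
--         segment2: Second segment [start, end]
--
--     Returns:
--         bool: True if segments overlap, False otherwise
--     """
--     return max(segment1[0], segment2[0]) < min(segment1[1], segment2[1])
--
-- def optimize_for_shortest_segments(segments: list[list[int]]) -> list[list[int]]:
--     """
--     Find non-overlapping segments prioritizing shorter individual segments.
--
--     Args: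
--         segments: List of segments [start, end]
--
--     Returns:
--         list: Optimized non-overlapping segments ordered by start position
--     """
--     if not segments:
--         return []
--
--     # Sort by length (ascending), then by start position for tie-breaking
--     sorted_segments = sorted(segments, key=lambda x: (x[1] - x[0], x[0]))
--
--     selected = []
--     for segment in sorted_segments:
--         # Check if current segment overlaps with any already selected segment
--         if not any(check_overlap(segment, selected_seg) for selected_seg in selected):
--             selected.append(segment)
--
--     # Return segments sorted by start position
--     return sorted(selected, key=lambda x: x[0])
-- ===== SOURCE B (Python) =====
-- def optimize_for_shortest_segments(segments: list[list[int]]) -> list[list[int]]: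
--     # Prune-as-you-go: pick the shortest remaining segment, then discard every
--     # remaining segment that overlaps it; no per-candidate scan of the selected set.
--     remaining = sorted(segments, key=lambda s: (s[1] - s[0], s[0]))
--     chosen = []
--     while remaining:
--         seg = remaining[0]
--         chosen.append(seg)
--         remaining = [s for s in remaining[1:]
--                      if max(s[0], seg[0]) >= min(s[1], seg[1])]
--     return sorted(chosen, key=lambda s: s[0])
-- ===== Notes on version B (the rewrite author's own statement) =====
-- stated objective: alternative
-- what changed: Instead of checking each candidate against every already-selected segment, B picks the shortest remaining segment and immediately filters all overlapping segments out of the remainder, so no selected-set scan exists.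
import Mathlib
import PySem

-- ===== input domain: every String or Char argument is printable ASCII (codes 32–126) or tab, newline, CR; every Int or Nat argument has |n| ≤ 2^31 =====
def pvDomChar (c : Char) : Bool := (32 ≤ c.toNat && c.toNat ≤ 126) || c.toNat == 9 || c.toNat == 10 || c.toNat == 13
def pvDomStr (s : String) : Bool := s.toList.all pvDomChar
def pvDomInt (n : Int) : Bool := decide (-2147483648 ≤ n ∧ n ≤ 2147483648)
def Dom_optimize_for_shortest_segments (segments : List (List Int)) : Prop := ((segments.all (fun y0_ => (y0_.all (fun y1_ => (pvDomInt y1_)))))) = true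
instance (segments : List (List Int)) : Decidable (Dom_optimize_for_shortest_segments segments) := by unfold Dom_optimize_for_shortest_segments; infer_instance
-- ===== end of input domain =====

-- B prunes overlapping segments from the remainder right after each selection,
-- instead of re-checking every candidate against the whole selected set (alternative decomposition, same cost class).


-- ===== PORT A =====
-- s[i] for the in-range indices 0 and 1 (Pre_ guarantees length ≥ 2, where Python returns)
def pyAt (s : List Int) (i : Int) : Int := PySem.List.pyGetD s i 0

def check_overlap (segment1 segment2 : List Int) : Bool :=
  decide (max (pyAt segment1 0) (pyAt segment2 0) < min (pyAt segment1 1) (pyAt segment2 1))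

def optimize_for_shortest_segments (segments : List (List Int)) : List (List Int) :=
  if segments = [] then []
  else
    let sorted_segments := PySem.List.sorted2 segments (fun x => pyAt x 1 - pyAt x 0) (fun x => pyAt x 0)
    let selected := sorted_segments.foldl
      (fun sel segment =>
        if sel.any (fun selected_seg => check_overlap segment selected_seg) then sel
        else sel ++ [segment]) []
    PySem.List.sorted selected (fun x => pyAt x 0)

-- ===== PORT B =====
-- the while loop of Source B: pick the head, append it, keep only non-overlapping remainder
def bLoop (remaining chosen : List (List Int)) : List (List Int) :=
  match remaining with
  | [] => chosen
  | seg :: rest =>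
      bLoop (rest.filter (fun s =>
          decide (min (PySem.List.pyGetD s 1 0) (PySem.List.pyGetD seg 1 0)
                  ≤ max (PySem.List.pyGetD s 0 0) (PySem.List.pyGetD seg 0 0))))
        (chosen ++ [seg])
termination_by remaining.length
decreasing_by
  simp only [List.length_unattach, List.length_cons, Nat.lt_succ_iff]
  exact le_trans (List.length_filter_le _ _) (by simp)

def optimize_for_shortest_segments_alt (segments : List (List Int)) : List (List Int) :=
  let remaining := PySem.List.sorted2 segments
    (fun s => PySem.List.pyGetD s 1 0 - PySem.List.pyGetD s 0 0) (fun s => PySem.List.pyGetD s 0 0)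
  PySem.List.sorted (bLoop remaining []) (fun s => PySem.List.pyGetD s 0 0)

-- ===== PRECONDITION & SPEC =====
-- Pre_: every segment carries at least the two entries [start, end]; on a shorter segment
-- (with segments nonempty) Python A raises IndexError in the sort key or overlap check.
def Pre_optimize_for_shortest_segments (segments : List (List Int)) : Prop :=
  ∀ s ∈ segments, 2 ≤ s.length
instance (segments : List (List Int)) : Decidable (Pre_optimize_for_shortest_segments segments) := by unfold Pre_optimize_for_shortest_segments; infer_instance

def pvWitness_optimize_for_shortest_segments : List (List Int) := [[0, 2], [1, 3], [4, 5]]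

def Spec_optimize_for_shortest_segments (segments : List (List Int)) (out : List (List Int)) : Prop := out = optimize_for_shortest_segments_alt segments
instance (segments : List (List Int)) (out : List (List Int)) : Decidable (Spec_optimize_for_shortest_segments segments out) := by unfold Spec_optimize_for_shortest_segments; infer_instance

-- ===== CLAIM (what is proved, stated in full; the proofs are below) =====
def Claim_equal_optimize_for_shortest_segments : Prop := ∀ (segments : List (List Int)), Dom_optimize_for_shortest_segments segments → Pre_optimize_for_shortest_segments segments → Spec_optimize_for_shortest_segments segments (optimize_for_shortest_segments segments)

-- ===== LEMMAS AND PROOFS =====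

-- proof-only restatement of bLoop without the accumulator
def bSel (remaining : List (List Int)) : List (List Int) :=
  match remaining with
  | [] => []
  | seg :: rest =>
      seg :: bSel (rest.filter (fun s =>
        decide (min (pyAt s 1) (pyAt seg 1) ≤ max (pyAt s 0) (pyAt seg 0))))
termination_by remaining.length
decreasing_by
  simp only [List.length_unattach, List.length_cons, Nat.lt_succ_iff]
  exact le_trans (List.length_filter_le _ _) (by simp)

theorem bLoop_nil (chosen : List (List Int)) : bLoop [] chosen = chosen := by
  rw [bLoop.eq_def]

theorem bLoop_cons (seg : List Int) (rest chosen : List (List Int)) :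
    bLoop (seg :: rest) chosen
      = bLoop (rest.filter (fun s =>
          decide (min (PySem.List.pyGetD s 1 0) (PySem.List.pyGetD seg 1 0)
                  ≤ max (PySem.List.pyGetD s 0 0) (PySem.List.pyGetD seg 0 0))))
          (chosen ++ [seg]) := by
  rw [bLoop.eq_def]

theorem bSel_nil : bSel [] = [] := by
  rw [bSel.eq_def]

theorem bSel_cons (seg : List Int) (rest : List (List Int)) :
    bSel (seg :: rest)
      = seg :: bSel (rest.filter (fun s =>
          decide (min (pyAt s 1) (pyAt seg 1) ≤ max (pyAt s 0) (pyAt seg 0)))) := by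
  rw [bSel.eq_def]

theorem keep_eq_not_overlap (s x : List Int) :
    (decide (min (pyAt s 1) (pyAt x 1) ≤ max (pyAt s 0) (pyAt x 0)))
      = !check_overlap s x := by
  simp only [check_overlap, ← decide_not, decide_eq_decide]
  omega

theorem bLoop_eq_bounded (n : Nat) : ∀ rem : List (List Int), rem.length ≤ n →
    ∀ chosen, bLoop rem chosen = chosen ++ bSel rem := by
  induction n with
  | zero =>
      intro rem h chosen
      have : rem = [] := by cases rem <;> simp_all
      subst this
      rw [bLoop_nil, bSel_nil, List.append_nil]
  | succ n ih =>
      intro rem h chosen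
      match rem with
      | [] => rw [bLoop_nil, bSel_nil, List.append_nil]
      | seg :: rest =>
          rw [bLoop_cons, bSel_cons]
          have hlen : (rest.filter (fun s =>
              decide (min (pyAt s 1) (pyAt seg 1) ≤ max (pyAt s 0) (pyAt seg 0)))).length ≤ n := by
            have := List.length_filter_le (fun s =>
              decide (min (pyAt s 1) (pyAt seg 1) ≤ max (pyAt s 0) (pyAt seg 0))) rest
            simp only [List.length_cons] at h
            omega
          simp only [pyAt] at hlen
          exact (ih _ hlen (chosen ++ [seg])).trans (by simp [pyAt])

theorem bLoop_eq (rem chosen : List (List Int)) : bLoop rem chosen = chosen ++ bSel rem :=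
  bLoop_eq_bounded rem.length rem le_rfl chosen

theorem foldSel_eq (l : List (List Int)) : ∀ acc : List (List Int),
    l.foldl (fun sel segment =>
        if sel.any (fun selected_seg => check_overlap segment selected_seg) then sel
        else sel ++ [segment]) acc
      = acc ++ bSel (l.filter (fun s => !(acc.any (fun t => check_overlap s t)))) := by
  induction l with
  | nil => intro acc; rw [List.foldl_nil, List.filter_nil, bSel_nil, List.append_nil]
  | cons x t ih =>
      intro acc
      rw [List.foldl_cons, List.filter_cons]
      by_cases h : acc.any (fun u => check_overlap x u) = true
      · rw [if_pos h, if_neg (by simp [h])]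
        exact ih acc
      · have h' : acc.any (fun u => check_overlap x u) = false := by simpa using h
        rw [if_neg (by simp [h']), if_pos (by simp [h'])]
        have hfil : t.filter (fun s => !((acc ++ [x]).any (fun u => check_overlap s u)))
            = (t.filter (fun s => !(acc.any (fun u => check_overlap s u)))).filter
                (fun s => decide (min (pyAt s 1) (pyAt x 1) ≤ max (pyAt s 0) (pyAt x 0))) := by
          rw [List.filter_filter]
          apply List.filter_congr
          intro s _
          rw [keep_eq_not_overlap]
          simp only [List.any_append, List.any_cons, List.any_nil, Bool.or_false, Bool.not_or]
          rw [Bool.and_comm]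
        rw [ih (acc ++ [x]), bSel_cons, ← hfil]
        simp

theorem selected_eq (l : List (List Int)) :
    l.foldl (fun sel segment =>
        if sel.any (fun selected_seg => check_overlap segment selected_seg) then sel
        else sel ++ [segment]) []
      = bSel l := by
  rw [foldSel_eq]
  simp

-- ===== VERDICT (by name: the statement is the Claim_ definition above) =====
theorem optimize_for_shortest_segments_spec : Claim_equal_optimize_for_shortest_segments := by
  intro segments _ _
  show optimize_for_shortest_segments segments = optimize_for_shortest_segments_alt segments
  unfold optimize_for_shortest_segments optimize_for_shortest_segments_alt
  by_cases h : segments = []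
  · subst h
    show optimize_for_shortest_segments [] = _
    rw [show optimize_for_shortest_segments [] = [] from rfl]
    rw [show PySem.List.sorted2 ([] : List (List Int))
        (fun s => PySem.List.pyGetD s 1 0 - PySem.List.pyGetD s 0 0)
        (fun s => PySem.List.pyGetD s 0 0) = [] from rfl]
    dsimp only
    rw [bLoop_nil]
    rfl
  · rw [if_neg h]
    dsimp only
    rw [bLoop_eq]
    simp only [selected_eq, List.nil_append, pyAt]
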